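-- pv_equiv track=rewrite | github.com/anton-povarov/experimental | py/google_binary_search.py | find_x_or_next_smallest__binsearch
-- ===== SOURCE A (Python) =====
-- from typing import List
--
-- def find_x_or_next_smallest__binsearch(a: List[int], x: int) -> int:
--     if len(a) == 0:
--         return -1
--
--     begin = 0
--     end = len(a)
--
--     MAX_SIZE_FOR_LINEAR_SCAN = 4
--
--     while (end - begin) > MAX_SIZE_FOR_LINEAR_SCAN:
--         pivot = begin + (end - begin) // 2
--
--         if a[pivot] <= x:  # x is in [pivot, end)
--             begin = pivot
--             continue
--         else:  # x is in [begin, pivot)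
--             end = pivot
--
--     # linear search when the array is sufficiently small
--     for i in reversed(range(begin, end)):
--         if a[i] <= x:
--             return a[i]
--
--     # if exact item was not found with liear search, return one to the left if there is anything
--     return a[begin] - 1 if begin > 0 else -1
-- ===== SOURCE B (Python) =====
-- def find_x_or_next_smallest__binsearch(a, x):
--     best = -1
--     for v in a:
--         if v <= x:
--             best = v
--         else:
--             break
--     return best
-- ===== Notes on version B (the rewrite author's own statement) =====
-- stated objective: simpler
-- what changed: Replaced the binary-search narrowing loop plus reversed linear tail scan and fallback arithmetic with a single forward scan that keeps the last value <= x; Pre_ restricts to lists partitioned with respect to x (all elements > x come after all elements <= x), which sorted input guarantees.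
-- outside the precondition, e.g. on find_x_or_next_smallest__binsearch([5, 1], 3): A returns 1, B returns -1
import Mathlib
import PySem

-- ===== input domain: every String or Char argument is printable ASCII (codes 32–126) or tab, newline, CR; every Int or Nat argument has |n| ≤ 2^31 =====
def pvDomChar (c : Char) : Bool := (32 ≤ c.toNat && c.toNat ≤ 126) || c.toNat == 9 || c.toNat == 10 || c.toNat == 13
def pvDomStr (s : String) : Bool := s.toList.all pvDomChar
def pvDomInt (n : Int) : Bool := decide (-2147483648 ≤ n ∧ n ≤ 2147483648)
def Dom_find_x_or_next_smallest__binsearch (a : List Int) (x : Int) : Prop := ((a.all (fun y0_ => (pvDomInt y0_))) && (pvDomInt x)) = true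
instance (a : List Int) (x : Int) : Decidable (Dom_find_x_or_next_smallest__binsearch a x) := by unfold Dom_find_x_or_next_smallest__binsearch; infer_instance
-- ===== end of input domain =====

-- B replaces the binary-search narrowing loop + reversed tail scan with one forward
-- scan keeping the last value ≤ x (objective: simpler, on sorted input).

-- ===== PORT A =====
-- the 'while (end - begin) > 4' narrowing loop; indices begin/end are Python ints that
-- the algorithm keeps in [0, len], so Nat with List.getD is exact for Python's a[pivot]
def pvLoopA (a : List Int) (x : Int) (b e : Nat) : Nat × Nat :=
  if _h : e - b > 4 then
    let pivot := b + (e - b) / 2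
    if a.getD pivot 0 ≤ x then pvLoopA a x pivot e
    else pvLoopA a x b pivot
  else (b, e)
termination_by e - b
decreasing_by all_goals omega

-- 'for i in reversed(range(begin, end))', k counts the remaining indices, i = b + k
def pvScanRevA (a : List Int) (x : Int) (b : Nat) : Nat → Option Int
  | 0 => none
  | k+1 => if a.getD (b+k) 0 ≤ x then some (a.getD (b+k) 0) else pvScanRevA a x b k

def find_x_or_next_smallest__binsearch (a : List Int) (x : Int) : Int :=
  if a.length = 0 then -1
  else
    let be := pvLoopA a x 0 a.length
    match pvScanRevA a x be.1 (be.2 - be.1) with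
    | some v => v
    | none => if be.1 > 0 then a.getD be.1 0 - 1 else -1

-- ===== PORT B =====
-- best = -1; for v in a: if v <= x: best = v else: break; return best
def pvScanB (x : Int) : List Int → Int → Int
  | [], best => best
  | v :: t, best => if v ≤ x then pvScanB x t v else best

def find_x_or_next_smallest__binsearch_alt (a : List Int) (x : Int) : Int :=
  pvScanB x a (-1)

-- ===== PRECONDITION & SPEC =====
-- Pre_ requires a to be partitioned with respect to x (no element > x is followed by
-- one ≤ x) — this is implied by the sorted order a binary search assumes; on other
-- lists A's value is an accident of its pivot choices.
def Pre_find_x_or_next_smallest__binsearch (a : List Int) (x : Int) : Prop :=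
  ∀ i, i < a.length → ∀ j, j < a.length → i < j → x < a.getD i 0 → x < a.getD j 0
instance (a : List Int) (x : Int) : Decidable (Pre_find_x_or_next_smallest__binsearch a x) := by
  unfold Pre_find_x_or_next_smallest__binsearch; infer_instance
def pvWitness_find_x_or_next_smallest__binsearch : List Int × Int := ([1, 3, 3, 7], 4)

def Spec_find_x_or_next_smallest__binsearch (a : List Int) (x : Int) (out : Int) : Prop := out = find_x_or_next_smallest__binsearch_alt a x
instance (a : List Int) (x : Int) (out : Int) : Decidable (Spec_find_x_or_next_smallest__binsearch a x out) := by unfold Spec_find_x_or_next_smallest__binsearch; infer_instance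

-- ===== CLAIM (what is proved, stated in full; the proofs are below) =====
def Claim_equal_find_x_or_next_smallest__binsearch : Prop := ∀ (a : List Int) (x : Int), Dom_find_x_or_next_smallest__binsearch a x → Pre_find_x_or_next_smallest__binsearch a x → Spec_find_x_or_next_smallest__binsearch a x (find_x_or_next_smallest__binsearch a x)

-- ===== LEMMAS AND PROOFS =====

-- For a partitioned list there is a split point K: everything before it is ≤ x,
-- everything from it on is > x.
lemma pv_exists_K (a : List Int) (x : Int)
    (hp : ∀ i, i < a.length → ∀ j, j < a.length → i < j → x < a.getD i 0 → x < a.getD j 0) :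
    ∃ K, K ≤ a.length ∧ (∀ j, j < K → a.getD j 0 ≤ x) ∧
      (∀ j, K ≤ j → j < a.length → x < a.getD j 0) := by
  induction a with
  | nil => exact ⟨0, by simp, by omega, by simp⟩
  | cons v t ih =>
    by_cases hvx : v ≤ x
    · obtain ⟨K', h1, h2, h3⟩ := ih (by
        intro i hi j hj hij hxi
        have := hp (i+1) (by simp; omega) (j+1) (by simp; omega) (by omega)
          (by simpa using hxi)
        simpa using this)
      refine ⟨K' + 1, by simp; omega, ?_, ?_⟩
      · intro j hj
        cases j with
        | zero => simpa using hvx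
        | succ j' => simpa using h2 j' (by omega)
      · intro j hK hj
        cases j with
        | zero => omega
        | succ j' => simpa using h3 j' (by omega) (by simpa using hj)
    · refine ⟨0, by omega, by omega, ?_⟩
      intro j _ hj
      cases j with
      | zero => simpa using lt_of_not_ge hvx
      | succ j' =>
        have := hp 0 (by simp) (j'+1) hj (by omega) (by simpa using lt_of_not_ge hvx)
        simpa using this

-- B's scan returns a[K-1] (or best if K = 0).
lemma pv_scanB_eq (x : Int) (l : List Int) : ∀ (best : Int) (K : Nat), K ≤ l.length →
    (∀ j, j < K → l.getD j 0 ≤ x) → (∀ j, K ≤ j → j < l.length → x < l.getD j 0) →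
    pvScanB x l best = if K = 0 then best else l.getD (K-1) 0 := by
  induction l with
  | nil =>
    intro best K h1 _ _
    have hK0 : K = 0 := Nat.le_zero.mp h1
    simp [pvScanB, hK0]
  | cons v t ih =>
    intro best K h1 h2 h3
    by_cases hvx : v ≤ x
    · have hK : K ≠ 0 := by
        intro h0
        have := h3 0 (by omega) (by simp)
        simp at this; omega
      rw [pvScanB, if_pos hvx]
      rw [ih v (K-1) (by simp at h1; omega)
        (fun j hj => by simpa using h2 (j+1) (by omega))
        (fun j hK' hj => by simpa using h3 (j+1) (by omega) (by simpa using hj))]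
      by_cases h1 : K = 1
      · simp [h1]
      · rw [if_neg (by omega), if_neg hK]
        have : K - 1 = (K - 2) + 1 := by omega
        rw [this, List.getD_cons_succ]
        congr 1
    · have hK : K = 0 := by
        by_contra h0
        exact hvx (by simpa using h2 0 (by omega))
      rw [pvScanB, if_neg hvx, if_pos hK]

-- A's reversed linear scan over the window [b, b+k) in terms of K.
lemma pv_scanRevA_eq (a : List Int) (x : Int) (K : Nat)
    (h2 : ∀ j, j < K → a.getD j 0 ≤ x)
    (h3 : ∀ j, K ≤ j → j < a.length → x < a.getD j 0) :
    ∀ (k b : Nat), b + k ≤ a.length → K ≤ b + k →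
    pvScanRevA a x b k = if K ≤ b then none else some (a.getD (K-1) 0) := by
  intro k
  induction k with
  | zero => intro b _ hK; rw [pvScanRevA, if_pos (by omega)]
  | succ k ihk =>
    intro b hlen hK
    rw [pvScanRevA]
    by_cases hp : a.getD (b+k) 0 ≤ x
    · have hlt : b + k < K := by
        by_contra h
        have := h3 (b+k) (by omega) (by omega)
        omega
      have hKeq : K = b + k + 1 := by omega
      rw [if_pos hp, if_neg (by omega)]
      congr 2
      omega
    · have hge : K ≤ b + k := by
        by_contra h
        exact hp (h2 (b+k) (by omega))
      rw [if_neg hp]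
      exact ihk b (by omega) hge

-- The narrowing loop preserves its invariant.
lemma pv_loop_inv (a : List Int) (x : Int) (K : Nat)
    (hK2 : ∀ j, j < K → a.getD j 0 ≤ x)
    (hK3 : ∀ j, K ≤ j → j < a.length → x < a.getD j 0) :
    ∀ (n b e : Nat), e - b ≤ n → b ≤ e → e ≤ a.length → b < a.length →
    (b = 0 ∨ a.getD b 0 ≤ x) → (∀ j, e ≤ j → j < a.length → x < a.getD j 0) →
    (pvLoopA a x b e).1 ≤ (pvLoopA a x b e).2 ∧ (pvLoopA a x b e).2 ≤ a.length ∧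
    (pvLoopA a x b e).1 < a.length ∧
    ((pvLoopA a x b e).1 = 0 ∨ a.getD (pvLoopA a x b e).1 0 ≤ x) ∧
    (∀ j, (pvLoopA a x b e).2 ≤ j → j < a.length → x < a.getD j 0) := by
  intro n
  induction n with
  | zero =>
    intro b e hn hbe hel hbl hb he
    rw [pvLoopA, dif_neg (by omega)]
    exact ⟨hbe, hel, hbl, hb, he⟩
  | succ n ihn =>
    intro b e hn hbe hel hbl hb he
    rw [pvLoopA]
    by_cases hgt : e - b > 4
    · rw [dif_pos hgt]
      by_cases hp : a.getD (b + (e - b) / 2) 0 ≤ x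
      · rw [if_pos hp]
        exact ihn (b + (e - b) / 2) e (by omega) (by omega) hel (by omega)
          (Or.inr hp) he
      · rw [if_neg hp]
        refine ihn b (b + (e - b) / 2) (by omega) (by omega) (by omega) hbl hb ?_
        have hpK : K ≤ b + (e - b) / 2 := by
          by_contra h
          exact hp (hK2 _ (by omega))
        intro j hj hjl
        exact hK3 j (by omega) hjl
    · rw [dif_neg hgt]
      exact ⟨hbe, hel, hbl, hb, he⟩

-- ===== VERDICT (by name: the statement is the Claim_ definition above) =====
theorem find_x_or_next_smallest__binsearch_spec : Claim_equal_find_x_or_next_smallest__binsearch := by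
  intro a x _ hpre
  unfold Spec_find_x_or_next_smallest__binsearch
  unfold Pre_find_x_or_next_smallest__binsearch at hpre
  obtain ⟨K, hK1, hK2, hK3⟩ := pv_exists_K a x hpre
  unfold find_x_or_next_smallest__binsearch find_x_or_next_smallest__binsearch_alt
  by_cases hnil : a.length = 0
  · rw [if_pos hnil]
    rw [List.length_eq_zero_iff.mp hnil]
    rfl
  · rw [if_neg hnil]
    obtain ⟨hbe, hel, hbl, hb, he⟩ :=
      pv_loop_inv a x K hK2 hK3 a.length 0 a.length (by omega) (by omega) le_rfl
        (by omega) (Or.inl rfl) (by omega)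
    set b := (pvLoopA a x 0 a.length).1 with hbdef
    set e := (pvLoopA a x 0 a.length).2 with hedef
    have hKe : K ≤ e := by
      by_contra h
      have h1 : e < a.length := by omega
      have := he e le_rfl h1
      have := hK2 e (by omega)
      omega
    change (match pvScanRevA a x b (e - b) with
      | some v => v
      | none => if b > 0 then a.getD b 0 - 1 else -1) = pvScanB x a (-1)
    rw [pv_scanRevA_eq a x K hK2 hK3 (e - b) b (by omega) (by omega)]
    rw [pv_scanB_eq x a (-1) K hK1 hK2 hK3]
    by_cases hKb : K ≤ b
    · rw [if_pos hKb]
      have hb0 : b = 0 := by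
        rcases hb with h | h
        · exact h
        · exact absurd h (by have := hK3 b hKb hbl; omega)
      show (if b > 0 then a.getD b 0 - 1 else -1) = _
      rw [if_neg (by omega), if_pos (by omega : K = 0)]
    · rw [if_neg hKb]
      show a.getD (K - 1) 0 = _
      rw [if_neg (by omega : ¬ K = 0)]
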